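-- pv_equiv track=rewrite | github.com/k-harada/AtCoder | ABC/ABC001-100/ABC097/D.py | solve
-- ===== SOURCE A (Python) =====
-- class UnionFind:
--     def __init__(self, n):
--         self.par = [i for i in range(n + 1)]
--         self.rank = [0] * (n + 1)
--
--     # search
--     def find(self, x):
--         if self.par[x] == x:
--             return x
--         else:
--             self.par[x] = self.find(self.par[x])
--             return self.par[x]
--
--     # unite
--     def union(self, x, y):
--         x = self.find(x)
--         y = self.find(y)
--         if self.rank[x] < self.rank[y]:
--             self.par[x] = y
--         else:
--             self.par[y] = x
--             if self.rank[x] == self.rank[y]: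
--                 self.rank[x] += 1
--
--     # check
--     def same_check(self, x, y):
--         return self.find(x) == self.find(y)
--
-- def solve(n, m, p_list, xy_list):
--     uf = UnionFind(n + 1)
--     for x, y in xy_list:
--         uf.union(x, y)
--     res = 0
--     for a in range(1, n + 1):
--         if uf.find(a) == uf.find(p_list[a - 1]):
--             res += 1
--     return res
-- ===== SOURCE B (Python) =====
-- def solve(n, m, p_list, xy_list):
--     # Label-merging connectivity over the same node space 0..n+1 as the problem's
--     # 1..n nodes plus padding: comp[v] is the current component label of v.
--     # Each edge merges two labels by rewriting one label into the other.
--     comp = list(range(n + 2))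
--     for x, y in xy_list:
--         cx, cy = comp[x], comp[y]
--         if cx != cy:
--             comp = [cx if c == cy else c for c in comp]
--     return sum(1 for a in range(1, n + 1) if comp[a] == comp[p_list[a - 1]])
-- ===== Notes on version B (the rewrite author's own statement) =====
-- stated objective: alternative
-- what changed: Replaces the rank+path-compression union-find parent forest with a flat component-label array over the same node space, merged by relabelling one class into the other per edge, so there is no parent forest, no recursion and no rank bookkeeping.
import Mathlib
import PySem

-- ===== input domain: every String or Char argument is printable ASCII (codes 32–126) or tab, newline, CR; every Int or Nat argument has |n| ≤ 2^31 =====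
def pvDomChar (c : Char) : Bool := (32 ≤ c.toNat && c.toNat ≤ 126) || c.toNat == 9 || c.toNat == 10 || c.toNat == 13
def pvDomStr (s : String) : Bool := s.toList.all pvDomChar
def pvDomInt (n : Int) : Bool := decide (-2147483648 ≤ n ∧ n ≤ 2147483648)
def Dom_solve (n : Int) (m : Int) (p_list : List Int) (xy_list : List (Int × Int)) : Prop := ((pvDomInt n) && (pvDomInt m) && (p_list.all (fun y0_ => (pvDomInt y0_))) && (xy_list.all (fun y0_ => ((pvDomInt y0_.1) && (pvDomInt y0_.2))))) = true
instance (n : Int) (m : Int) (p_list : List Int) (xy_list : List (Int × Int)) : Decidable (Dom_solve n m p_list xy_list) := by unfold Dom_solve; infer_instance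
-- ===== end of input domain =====

-- B replaces A's rank+path-compression union-find forest with a flat component-label
-- array merged by relabelling; equivalence is about the return value (A mutates nothing visible).

-- ===== PORT A =====
-- list indexing / assignment: exact for indices in range (Pre_solve keeps every access in range)
def lget (l : List Int) (i : Int) : Int := PySem.List.pyGetD l i 0
def lset (l : List Int) (i : Int) (v : Int) : List Int := PySem.List.pySetD l i v

-- UnionFind.find with path compression; the fuel argument only makes the recursion
-- structural (a sufficient amount is always supplied by `solve`, proved below).
def findA : Nat → List Int → Int → List Int × Int
  | 0, par, x => (par, x)
  | Nat.succ f, par, x =>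
    if lget par x = x then (par, x)
    else
      let pr := findA f par (lget par x)
      let par2 := lset pr.1 x pr.2
      (par2, lget par2 x)

-- UnionFind.union (union by rank)
def unionA (fuel : Nat) (par rank : List Int) (x y : Int) : List Int × List Int :=
  let fx := findA fuel par x
  let fy := findA fuel fx.1 y
  let rx := fx.2
  let ry := fy.2
  let par2 := fy.1
  if lget rank rx < lget rank ry then (lset par2 rx ry, rank)
  else
    let par3 := lset par2 ry rx
    if lget rank rx = lget rank ry then (par3, lset rank rx (lget rank rx + 1))
    else (par3, rank)

def solve (n : Int) (m : Int) (p_list : List Int) (xy_list : List (Int × Int)) : Int :=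
  let fuel := (n + 2).toNat + xy_list.length
  let par0 := PySem.List.pyRange 0 (n + 2) 1
  let rank0 := List.replicate (n + 2).toNat (0 : Int)
  let st := xy_list.foldl (fun (s : List Int × List Int) xy => unionA fuel s.1 s.2 xy.1 xy.2) (par0, rank0)
  let fin := (PySem.List.pyRange 1 (n + 1) 1).foldl
    (fun (s : List Int × Int) a =>
       let fa := findA fuel s.1 a
       let fp := findA fuel fa.1 (lget p_list (a - 1))
       (fp.1, s.2 + if fa.2 = fp.2 then 1 else 0)) (st.1, 0)
  fin.2

-- ===== PORT B =====
def solve_alt (n : Int) (m : Int) (p_list : List Int) (xy_list : List (Int × Int)) : Int :=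
  let comp0 := PySem.List.pyRange 0 (n + 2) 1
  let comp := xy_list.foldl (fun (comp : List Int) xy =>
      let cx := lget comp xy.1
      let cy := lget comp xy.2
      if cx ≠ cy then comp.map (fun c => if c = cy then cx else c) else comp) comp0
  (PySem.List.pyRange 1 (n + 1) 1).foldl
    (fun acc a => acc + if lget comp a = lget comp (lget p_list (a - 1)) then 1 else 0) 0

-- ===== PRECONDITION & SPEC =====
-- Pre_solve excludes exactly the inputs on which A raises (IndexError): an edge endpoint
-- or a needed p-entry outside Python's index range for the length-(n+2) internal arrays,
-- or p_list shorter than n.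
def Pre_solve (n : Int) (m : Int) (p_list : List Int) (xy_list : List (Int × Int)) : Prop :=
  (∀ xy ∈ xy_list, PySem.Raise.InRange (n + 2).toNat xy.1 ∧ PySem.Raise.InRange (n + 2).toNat xy.2) ∧
  (0 < n → n ≤ (p_list.length : Int) ∧ ∀ v ∈ p_list.take n.toNat, PySem.Raise.InRange (n + 2).toNat v)

instance (n : Int) (m : Int) (p_list : List Int) (xy_list : List (Int × Int)) : Decidable (Pre_solve n m p_list xy_list) := by unfold Pre_solve; infer_instance

def pvWitness_solve : Int × Int × List Int × (List (Int × Int)) := (3, 2, [2, 1, 3], [(1, 2), (2, 3)])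

def Spec_solve (n : Int) (m : Int) (p_list : List Int) (xy_list : List (Int × Int)) (out : Int) : Prop := out = solve_alt n m p_list xy_list
instance (n : Int) (m : Int) (p_list : List Int) (xy_list : List (Int × Int)) (out : Int) : Decidable (Spec_solve n m p_list xy_list out) := by unfold Spec_solve; infer_instance

-- ===== CLAIM (what is proved, stated in full; the proofs are below) =====
def Claim_equal_solve : Prop := ∀ (n : Int) (m : Int) (p_list : List Int) (xy_list : List (Int × Int)), Dom_solve n m p_list xy_list → Pre_solve n m p_list xy_list → Spec_solve n m p_list xy_list (solve n m p_list xy_list)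

-- ===== LEMMAS AND PROOFS =====

-- x is a legal index of the parent array (length N)
def pvIdx (N x : Int) : Prop := 0 ≤ x ∧ x < N

-- k-fold parent step
def pvIter (par : List Int) : Nat → Int → Int
  | 0, x => x
  | Nat.succ k, x => pvIter par k (lget par x)

def pvFix (par : List Int) (x : Int) : Prop := lget par x = x

-- y reaches root r in exactly k steps
def pvReach (par : List Int) (k : Nat) (x r : Int) : Prop := pvIter par k x = r ∧ pvFix par r

-- same union-find class
def pvSame (par : List Int) (u v : Int) : Prop :=
  ∃ r j j', pvReach par j u r ∧ pvReach par j' v r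

theorem lget_lset_self {l : List Int} {i v : Int} (h0 : 0 ≤ i) (h : i.toNat < l.length) :
    lget (lset l i v) i = v := by
  rw [lget, lset, PySem.List.pySetD_of_nonneg l v h0,
    PySem.List.pyGetD_eq_getElem _ _ h0 (by simp; omega)]
  simp

theorem lget_lset_ne {l : List Int} {i j v : Int} (h0 : 0 ≤ i) (h0' : 0 ≤ j) (hne : j ≠ i) :
    lget (lset l i v) j = lget l j := by
  rw [lget, lget, lset, PySem.List.pySetD_of_nonneg l v h0]
  by_cases hj : j < (l.length : Int)
  · rw [PySem.List.pyGetD_eq_getElem _ _ h0' (by simpa using hj),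
      PySem.List.pyGetD_eq_getElem _ _ h0' hj]
    rw [List.getElem_set_ne (by omega)]
  · rw [PySem.List.pyGetD_of_none (l.set i.toNat v) j 0
        (by rw [PySem.List.pyGet?_eq_none_iff]; simp [PySem.Raise.InRange]; omega),
      PySem.List.pyGetD_of_none l j 0
        (by rw [PySem.List.pyGet?_eq_none_iff]; simp [PySem.Raise.InRange]; omega)]

theorem length_lset (l : List Int) (i v : Int) : (lset l i v).length = l.length := by
  simp [lset, PySem.List.length_pySetD]

theorem pvIter_add (par : List Int) (a b : Nat) (x : Int) :
    pvIter par (a + b) x = pvIter par a (pvIter par b x) := by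
  induction b generalizing x with
  | zero => rfl
  | succ b ih =>
      have : a + (b + 1) = (a + b) + 1 := by omega
      rw [this]
      show pvIter par (a + b) (lget par x) = _
      rw [ih (lget par x)]
      rfl

theorem pvIter_fix (par : List Int) {r : Int} (h : pvFix par r) (k : Nat) : pvIter par k r = r := by
  induction k with
  | zero => rfl
  | succ k ih => show pvIter par k (lget par r) = r; rw [h]; exact ih

theorem pvReach_det {par : List Int} {j j' : Nat} {x a b : Int}
    (h1 : pvReach par j x a) (h2 : pvReach par j' x b) : a = b := by
  rcases h1 with ⟨e1, f1⟩
  rcases h2 with ⟨e2, f2⟩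
  rcases Nat.le_total j j' with h | h
  · have : pvIter par j' x = pvIter par (j' - j + j) x := by rw [Nat.sub_add_cancel h]
    rw [this, pvIter_add, e1, pvIter_fix par f1] at e2
    omega
  · have : pvIter par j x = pvIter par (j - j' + j') x := by rw [Nat.sub_add_cancel h]
    rw [this, pvIter_add, e2, pvIter_fix par f2] at e1
    omega

theorem pvIter_idx {N : Int} {par : List Int} (cl : ∀ z, pvIdx N z → pvIdx N (lget par z))
    {x : Int} (hx : pvIdx N x) (k : Nat) : pvIdx N (pvIter par k x) := by
  induction k generalizing x with
  | zero => exact hx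
  | succ k ih => exact ih (cl x hx)

-- path compression preserves every reach fact (with no extra steps)

theorem reach_compress {N : Int} {par : List Int} {x r : Int}
    (hN : (par.length : Int) = N)
    (cl : ∀ z, pvIdx N z → pvIdx N (lget par z)) (hx : pvIdx N x)
    (hroot : ∃ kx, pvReach par kx x r) :
    ∀ (j : Nat) (y r' : Int), pvIdx N y → pvReach par j y r' →
      ∃ j' ≤ j, pvReach (lset par x r) j' y r' := by
  obtain ⟨hx0, hx1⟩ := hx
  obtain ⟨kx, hkx⟩ := hroot
  have hIr : pvIdx N r := by
    rw [← hkx.1]; exact pvIter_idx cl ⟨hx0, hx1⟩ kx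
  intro j
  induction j with
  | zero =>
      intro y r' hy hr
      obtain ⟨he, hf⟩ := hr
      have hyr : y = r' := he
      subst hyr
      by_cases hxy : y = x
      · subst hxy
        have hrx : r = y := pvReach_det hkx (show pvReach par 0 y y from ⟨rfl, hf⟩)
        refine ⟨0, le_refl 0, ?_, ?_⟩
        · rfl
        · show lget (lset par y r) y = y
          rw [lget_lset_self hx0 (by omega)]
          exact hrx
      · refine ⟨0, le_refl 0, rfl, ?_⟩
        show lget (lset par x r) y = y
        rw [lget_lset_ne hx0 hy.1 hxy]
        exact hf
  | succ j ih =>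
      intro y r' hy hr
      obtain ⟨he, hf⟩ := hr
      by_cases hxy : y = x
      · subst hxy
        have hrr : r' = r := pvReach_det ⟨he, hf⟩ hkx
        subst hrr
        by_cases hrx : r' = y
        · refine ⟨0, by omega, hrx.symm ▸ rfl, ?_⟩
          show lget (lset par y r') r' = r'
          rw [hrx, lget_lset_self hx0 (by omega)]
        · refine ⟨1, by omega, ?_, ?_⟩
          · show lget (lset par y r') y = r'
            exact lget_lset_self hx0 (by omega)
          · show lget (lset par y r') r' = r'
            rw [lget_lset_ne hx0 hIr.1 hrx]
            exact hkx.2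
      · have h1 : pvReach par j (lget par y) r' := ⟨he, hf⟩
        obtain ⟨j', hj', hr2⟩ := ih (lget par y) r' (cl y hy) h1
        refine ⟨j' + 1, by omega, ?_, hr2.2⟩
        show pvIter (lset par x r) j' (lget (lset par x r) y) = r'
        rw [lget_lset_ne hx0 hy.1 hxy]
        exact hr2.1

theorem reach_setroot {N : Int} {par : List Int} {rx ry : Int}
    (hN : (par.length : Int) = N)
    (cl : ∀ z, pvIdx N z → pvIdx N (lget par z))
    (hrx : pvIdx N rx) (hry : pvIdx N ry) (hfx : pvFix par rx) (hfy : pvFix par ry) :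
    ∀ (j : Nat) (y r' : Int), pvIdx N y → pvReach par j y r' →
      ∃ j' ≤ j + 1, pvReach (lset par ry rx) j' y (if r' = ry then rx else r') := by
  obtain ⟨hrx0, hrx1⟩ := hrx
  obtain ⟨hry0, hry1⟩ := hry
  intro j
  induction j with
  | zero =>
      intro y r' hy hr
      obtain ⟨he, hf⟩ := hr
      have hyr : y = r' := he
      subst hyr
      by_cases hxy : y = ry
      · rw [if_pos hxy]
        subst hxy
        by_cases hxr : rx = y
        · refine ⟨0, by omega, hxr ▸ rfl, ?_⟩
          show lget (lset par y rx) rx = rx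
          rw [hxr, lget_lset_self hry0 (by omega)]
        · refine ⟨1, by omega, ?_, ?_⟩
          · show lget (lset par y rx) y = rx
            exact lget_lset_self hry0 (by omega)
          · show lget (lset par y rx) rx = rx
            rw [lget_lset_ne hry0 hrx0 hxr]
            exact hfx
      · rw [if_neg hxy]
        refine ⟨0, by omega, rfl, ?_⟩
        show lget (lset par ry rx) y = y
        rw [lget_lset_ne hry0 hy.1 hxy]
        exact hf
  | succ j ih =>
      intro y r' hy hr
      obtain ⟨he, hf⟩ := hr
      by_cases hxy : y = ry
      · subst hxy
        have hrr : r' = y := pvReach_det ⟨he, hf⟩ (show pvReach par 0 y y from ⟨rfl, hfy⟩)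
        subst hrr
        rw [if_pos rfl]
        by_cases hxr : rx = r'
        · refine ⟨0, by omega, hxr ▸ rfl, ?_⟩
          show lget (lset par r' rx) rx = rx
          rw [hxr, lget_lset_self hry0 (by omega)]
        · refine ⟨1, by omega, ?_, ?_⟩
          · show lget (lset par r' rx) r' = rx
            exact lget_lset_self hry0 (by omega)
          · show lget (lset par r' rx) rx = rx
            rw [lget_lset_ne hry0 hrx0 hxr]
            exact hfx
      · have h1 : pvReach par j (lget par y) r' := ⟨he, hf⟩
        obtain ⟨j', hj', hr2⟩ := ih (lget par y) r' (cl y hy) h1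
        refine ⟨j' + 1, by omega, ?_, hr2.2⟩
        show pvIter (lset par ry rx) j' (lget (lset par ry rx) y) = _
        rw [lget_lset_ne hry0 hy.1 hxy]
        exact hr2.1

theorem find_spec {N : Int} (fuel : Nat) :
    ∀ (par : List Int) (x r : Int) (k : Nat),
      (par.length : Int) = N →
      (∀ z, pvIdx N z → pvIdx N (lget par z)) →
      pvIdx N x → pvReach par k x r → k ≤ fuel →
      (findA fuel par x).2 = r ∧
      (((findA fuel par x).1.length : Int) = N) ∧
      (∀ z, pvIdx N z → pvIdx N (lget (findA fuel par x).1 z)) ∧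
      (∀ (j : Nat) (y r' : Int), pvIdx N y → pvReach par j y r' →
        ∃ j' ≤ j, pvReach (findA fuel par x).1 j' y r') := by
  induction fuel with
  | zero =>
      intro par x r k hN cl hx hr hk
      have hk0 : k = 0 := by omega
      subst hk0
      have hxr : x = r := hr.1
      exact ⟨hxr, hN, cl, fun j y r' _ h => ⟨j, le_refl j, h⟩⟩
  | succ f ih =>
      intro par x r k hN cl hx hr hk
      by_cases hfix : lget par x = x
      · have heq : findA (f + 1) par x = (par, x) := by
          simp only [findA, if_pos hfix]
        rw [heq]
        have hxr : r = x := pvReach_det hr (show pvReach par 0 x x from ⟨rfl, hfix⟩)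
        exact ⟨hxr.symm, hN, cl, fun j y r' _ h => ⟨j, le_refl j, h⟩⟩
      · have heq : findA (f + 1) par x =
            (lset (findA f par (lget par x)).1 x (findA f par (lget par x)).2,
             lget (lset (findA f par (lget par x)).1 x (findA f par (lget par x)).2) x) := by
          simp only [findA, if_neg hfix]
        have hk0 : k ≠ 0 := by
          intro h; subst h
          apply hfix
          rw [(show x = r from hr.1)]
          exact hr.2
        obtain ⟨k0, rfl⟩ : ∃ k0, k = k0 + 1 := ⟨k - 1, by omega⟩
        have hr' : pvReach par k0 (lget par x) r := ⟨hr.1, hr.2⟩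
        obtain ⟨hP2, hPlen, hPcl, hPpres⟩ :=
          ih par (lget par x) r k0 hN cl (cl x hx) hr' (by omega)
        have hIr : pvIdx N r := by
          rw [← hr.1]; exact pvIter_idx cl hx (k0 + 1)
        have hroot1 : ∃ kx, pvReach (findA f par (lget par x)).1 kx x r := by
          obtain ⟨j1, _, h1⟩ := hPpres (k0 + 1) x r hx hr
          exact ⟨j1, h1⟩
        have hxlt : x.toNat < (findA f par (lget par x)).1.length := by
          have h1 := hx.1; have h2 := hx.2; omega
        constructor
        · rw [heq]
          show lget (lset (findA f par (lget par x)).1 x (findA f par (lget par x)).2) x = r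
          rw [lget_lset_self hx.1 hxlt, hP2]
        refine ⟨?_, ?_, ?_⟩
        · rw [heq]
          show ((lset (findA f par (lget par x)).1 x (findA f par (lget par x)).2).length : Int) = N
          rw [length_lset]; exact hPlen
        · rw [heq]
          intro z hz
          by_cases hzx : z = x
          · subst hzx
            show pvIdx N (lget (lset (findA f par (lget par z)).1 z (findA f par (lget par z)).2) z)
            rw [lget_lset_self hz.1 hxlt, hP2]
            exact hIr
          · show pvIdx N (lget (lset (findA f par (lget par x)).1 x (findA f par (lget par x)).2) z)
            rw [lget_lset_ne hx.1 hz.1 hzx]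
            exact hPcl z hz
        · rw [heq]
          intro j y r0 hy h0
          obtain ⟨j1, hj1, h1⟩ := hPpres j y r0 hy h0
          have := reach_compress hPlen hPcl hx (hP2 ▸ hroot1) j1 y r0 hy h1
          obtain ⟨j', hj', h'⟩ := this
          exact ⟨j', by omega, h'⟩

theorem merge_eq (a b p q : Int) :
    ((if a = q then p else a) = (if b = q then p else b)) ↔
      (a = b ∨ (a = p ∧ b = q) ∨ (a = q ∧ b = p)) := by
  split_ifs <;> omega

def pvNlz (L x : Int) : Int := if x < 0 then x + L else x

theorem lget_neg {par : List Int} {L x : Int} (hL : (par.length : Int) = L)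
    (h1 : -L ≤ x) (h2 : x < 0) : lget par x = lget par (x + L) := by
  have hx : x = -(((-x).toNat : Nat) : Int) := by omega
  rw [lget, lget, hx, PySem.List.pyGetD_neg_natCast par (-x).toNat 0 (by omega) (by omega),
    PySem.List.pyGetD_eq_getElem _ _ (by omega) (by omega)]
  congr 1
  omega

theorem lset_neg {par : List Int} {L x : Int} (v : Int) (hL : (par.length : Int) = L)
    (h1 : -L ≤ x) (h2 : x < 0) : lset par x v = lset par (x + L) v := by
  simp only [lset, PySem.List.pySetD, PySem.List.pySet?, PySem.List.pyIdx?]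
  rw [if_neg (by omega), if_pos (by omega), if_pos (by omega), if_pos (by omega)]
  simp only [Option.map_some, Option.getD_some]
  congr 1
  omega

theorem set_same {l : List Int} {x v : Int} (h0 : 0 ≤ x) (h : x.toNat < l.length)
    (hv : lget l x = v) : lset l x v = l := by
  rw [lset, PySem.List.pySetD_of_nonneg l v h0]
  rw [lget, PySem.List.pyGetD_eq_getElem _ _ h0 (by omega)] at hv
  apply List.ext_getElem (by simp)
  intro j h1 h2
  rw [List.getElem_set]
  split_ifs with hj
  · subst hj; exact hv.symm ▸ rfl
  · rfl

theorem find_len (fuel : Nat) : ∀ (par : List Int) (x : Int),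
    (findA fuel par x).1.length = par.length := by
  induction fuel with
  | zero => intro par x; rfl
  | succ f ih =>
      intro par x
      by_cases hfix : lget par x = x
      · simp only [findA, if_pos hfix]
      · simp only [findA, if_neg hfix]
        rw [lset, PySem.List.length_pySetD]
        exact ih par (lget par x)

theorem find_fix {fuel : Nat} {par : List Int} {x : Int} (h : lget par x = x) :
    findA fuel par x = (par, x) := by
  cases fuel with
  | zero => rfl
  | succ f => simp only [findA, if_pos h]

theorem find_neg {N : Int} {fuel : Nat} {par : List Int} {x : Int}
    (hlen : (par.length : Int) = N)
    (cl : ∀ z, pvIdx N z → pvIdx N (lget par z))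
    (h1 : -N ≤ x) (h2 : x < 0) (hf : 1 ≤ fuel) :
    findA fuel par x = findA fuel par (x + N) := by
  obtain ⟨f, rfl⟩ : ∃ f, fuel = f + 1 := ⟨fuel - 1, by omega⟩
  have hxI : pvIdx N (x + N) := ⟨by omega, by omega⟩
  have hval : lget par x = lget par (x + N) := lget_neg hlen h1 h2
  have hnotfix : ¬ lget par x = x := by
    have := cl (x + N) hxI
    rw [hval]
    intro hcc
    have := this.1
    omega
  by_cases hfix' : lget par (x + N) = x + N
  · rw [find_fix hfix']
    simp only [findA, if_neg hnotfix]
    have hsub : findA f par (lget par x) = (par, x + N) := by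
      rw [hval, hfix']
      exact find_fix hfix'
    rw [hsub]
    have hset : lset par x (x + N) = par := by
      rw [lset_neg _ hlen h1 h2]
      exact set_same hxI.1 (by omega) hfix'
    rw [hset]
    rw [hval.trans hfix']
  · simp only [findA, if_neg hnotfix, if_neg hfix']
    rw [hval]
    have hlen1 : ((findA f par (lget par (x + N))).1.length : Int) = N := by
      rw [find_len]; exact hlen
    rw [lset_neg _ hlen1 h1 h2]
    rw [lget_neg (by rw [lset, PySem.List.length_pySetD]; exact hlen1) h1 h2]

theorem nlz_bounds {L x : Int} (h1 : -L ≤ x) (h2 : x < L) : pvIdx L (pvNlz L x) := by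
  unfold pvNlz pvIdx
  split_ifs <;> omega

theorem find_nlz {N : Int} {fuel : Nat} {par : List Int} {x : Int}
    (hlen : (par.length : Int) = N)
    (cl : ∀ z, pvIdx N z → pvIdx N (lget par z))
    (h1 : -N ≤ x) (hf1 : 1 ≤ fuel) :
    findA fuel par x = findA fuel par (pvNlz N x) := by
  unfold pvNlz
  split_ifs with hneg
  · exact find_neg hlen cl h1 hneg hf1
  · rfl

theorem lget_nlz {L : Int} {l : List Int} {x : Int}
    (hlen : (l.length : Int) = L) (h1 : -L ≤ x) :
    lget l x = lget l (pvNlz L x) := by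
  unfold pvNlz
  split_ifs with hneg
  · exact lget_neg hlen h1 hneg
  · rfl

def rootEx (par : List Int) (x r : Int) : Prop := ∃ k, pvReach par k x r

def parOK (n : Int) (c : Nat) (par : List Int) : Prop :=
  ((par.length : Int) = n + 2) ∧
  (∀ z, pvIdx (n + 2) z → pvIdx (n + 2) (lget par z)) ∧
  (∀ z, pvIdx (n + 2) z → ∃ r, ∃ k ≤ c, pvReach par k z r)

theorem rootEx_unique {par : List Int} {x r1 r2 : Int}
    (h1 : rootEx par x r1) (h2 : rootEx par x r2) : r1 = r2 := by
  obtain ⟨k1, h1⟩ := h1; obtain ⟨k2, h2⟩ := h2; exact pvReach_det h1 h2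

theorem same_iff_roots {par : List Int} {u v ru rv : Int}
    (hu : rootEx par u ru) (hv : rootEx par v rv) :
    pvSame par u v ↔ ru = rv := by
  constructor
  · rintro ⟨r, j, j', h1, h2⟩
    have e1 : ru = r := rootEx_unique hu ⟨j, h1⟩
    have e2 : rv = r := rootEx_unique hv ⟨j', h2⟩
    omega
  · rintro rfl
    obtain ⟨k1, h1⟩ := hu; obtain ⟨k2, h2⟩ := hv
    exact ⟨ru, k1, k2, h1, h2⟩

theorem find_keep {n : Int} {fuel c : Nat} {par : List Int} {x : Int}
    (hok : parOK n c par) (hc : c ≤ fuel) (hx : pvIdx (n + 2) x) :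
    rootEx par x (findA fuel par x).2 ∧ parOK n c (findA fuel par x).1 ∧
    (∀ y r, pvIdx (n + 2) y → rootEx par y r → rootEx (findA fuel par x).1 y r) := by
  obtain ⟨hlen, hcl, htot⟩ := hok
  obtain ⟨r, k, hk, hr⟩ := htot x hx
  obtain ⟨h2, hlen', hcl', hpres⟩ := find_spec fuel par x r k hlen hcl hx hr (by omega)
  refine ⟨h2 ▸ ⟨k, hr⟩, ⟨hlen', hcl', ?_⟩, ?_⟩
  · intro z hz
    obtain ⟨rz, kz, hkz, hrz⟩ := htot z hz
    obtain ⟨j', hj', h'⟩ := hpres kz z rz hz hrz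
    exact ⟨rz, j', by omega, h'⟩
  · intro y r0 hy hr0
    obtain ⟨j, hj⟩ := hr0
    obtain ⟨j', _, h'⟩ := hpres j y r0 hy hj
    exact ⟨j', h'⟩

theorem same_preserved {par par' : List Int} {N u v : Int}
    (pres : ∀ y r, pvIdx N y → rootEx par y r → rootEx par' y r)
    (totu : ∃ r, rootEx par u r) (totv : ∃ r, rootEx par v r)
    (hu : pvIdx N u) (hv : pvIdx N v) :
    pvSame par' u v ↔ pvSame par u v := by
  obtain ⟨ru, hru⟩ := totu
  obtain ⟨rv, hrv⟩ := totv
  rw [same_iff_roots hru hrv,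
    same_iff_roots (pres u ru hu hru) (pres v rv hv hrv)]

theorem lget_map {l : List Int} (f : Int → Int) {u : Int}
    (h0 : 0 ≤ u) (h : u.toNat < l.length) :
    lget (l.map f) u = f (lget l u) := by
  rw [lget, lget, PySem.List.pyGetD_eq_getElem _ _ h0 (by simp; omega),
    PySem.List.pyGetD_eq_getElem _ _ h0 (by omega)]
  simp

theorem lget_pyRange0 {N i : Int} (h0 : 0 ≤ i) (h : i < N) :
    lget (PySem.List.pyRange 0 N 1) i = i := by
  rw [lget, PySem.List.pyGetD_eq_getElem _ _ h0
    (by rw [PySem.List.length_pyRange_one]; omega)]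
  rw [PySem.List.getElem_pyRange_one]
  omega

def InvJ (n : Int) (c : Nat) (par comp : List Int) : Prop :=
  parOK n c par ∧ comp.length = (n + 2).toNat ∧
  (∀ u v, pvIdx (n + 2) u → pvIdx (n + 2) v → (pvSame par u v ↔ lget comp u = lget comp v))

-- one edge: A's union and B's relabel preserve the joint invariant
set_option maxHeartbeats 2000000 in
theorem step_edge {n : Int} {fuel c : Nat} {par rank comp : List Int} {x y : Int}
    (hc : c ≤ fuel) (hInv : InvJ n c par comp) (hx : pvIdx (n + 2) x) (hy : pvIdx (n + 2) y) :
    InvJ n (c + 1) (unionA fuel par rank x y).1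
      (if lget comp x ≠ lget comp y then
         comp.map (fun c => if c = lget comp y then lget comp x else c) else comp) := by
  obtain ⟨hok, hclen, hsame⟩ := hInv
  have hxI := hx
  have hyI := hy
  -- find x, then find y
  obtain ⟨hrx, hok1, pres1⟩ := find_keep hok hc hxI
  obtain ⟨hry, hok2, pres2⟩ := find_keep hok1 hc hyI
  set F1 := findA fuel par x with hF1
  set F2 := findA fuel F1.1 y with hF2
  set rx := F1.2 with hrxd
  set ry := F2.2 with hryd
  clear_value rx ry
  clear_value F1 F2
  have hryp : rootEx par y ry := by
    obtain ⟨rv, hrv⟩ := (hok.2.2 y hyI).imp (fun r hr => (⟨hr.choose, hr.choose_spec.2⟩ : rootEx par y r))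
    have := pres1 y rv hyI hrv
    have e : ry = rv := rootEx_unique hry this
    exact e ▸ hrv
  have pres12 : ∀ z r, pvIdx (n + 2) z → rootEx par z r → rootEx F2.1 z r :=
    fun z r hz hr => pres2 z r hz (pres1 z r hz hr)
  have hrxF2 : rootEx F2.1 x rx := pres2 x rx hxI (pres1 x rx hxI hrx)
  have hryF2 : rootEx F2.1 y ry := pres2 y ry hyI hry
  have hfixrx : pvFix F2.1 rx := hrxF2.choose_spec.2
  have hfixry : pvFix F2.1 ry := hryF2.choose_spec.2
  have hIrx : pvIdx (n + 2) rx := by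
    obtain ⟨k, hk⟩ := hrxF2
    rw [← hk.1]
    exact pvIter_idx hok2.2.1 hxI k
  have hIry : pvIdx (n + 2) ry := by
    obtain ⟨k, hk⟩ := hryF2
    rw [← hk.1]
    exact pvIter_idx hok2.2.1 hyI k
  -- the new parent array, uniformly over the rank branches
  have hun : ∃ rk rr, ((rk = rx ∧ rr = ry) ∨ (rk = ry ∧ rr = rx)) ∧
      (unionA fuel par rank x y).1 = lset F2.1 rr rk := by
    by_cases hb : lget rank rx < lget rank ry
    · exact ⟨ry, rx, Or.inr ⟨rfl, rfl⟩, by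
        simp only [unionA, ← hF1, ← hF2]
        rw [← hrxd, ← hryd]
        rw [if_pos hb]⟩
    · refine ⟨rx, ry, Or.inl ⟨rfl, rfl⟩, ?_⟩
      simp only [unionA, ← hF1, ← hF2]
      rw [← hrxd, ← hryd]
      rw [if_neg hb]
      by_cases hb2 : lget rank rx = lget rank ry
      · rw [if_pos hb2]
      · rw [if_neg hb2]
  obtain ⟨rk, rr, hkr, hunEq⟩ := hun
  have hIrk : pvIdx (n + 2) rk := by rcases hkr with ⟨h1, _⟩ | ⟨h1, _⟩ <;> rw [h1] <;> assumption
  have hIrr : pvIdx (n + 2) rr := by rcases hkr with ⟨_, h1⟩ | ⟨_, h1⟩ <;> rw [h1] <;> assumption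
  have hfixrk : pvFix F2.1 rk := by rcases hkr with ⟨h1, _⟩ | ⟨h1, _⟩ <;> rw [h1] <;> assumption
  have hfixrr : pvFix F2.1 rr := by rcases hkr with ⟨_, h1⟩ | ⟨_, h1⟩ <;> rw [h1] <;> assumption
  -- preservation into the merged array
  have presM : ∀ z r, pvIdx (n + 2) z → rootEx par z r →
      rootEx (unionA fuel par rank x y).1 z (if r = rr then rk else r) := by
    intro z r hz hr
    obtain ⟨k, hk⟩ := pres12 z r hz hr
    obtain ⟨j', _, h'⟩ := reach_setroot hok2.1 hok2.2.1 hIrk hIrr hfixrk hfixrr k z r hz hk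
    exact hunEq ▸ ⟨j', h'⟩
  have hlen' : (((unionA fuel par rank x y).1.length : Int)) = n + 2 := by
    rw [hunEq, length_lset]; exact hok2.1
  have hcl' : ∀ z, pvIdx (n + 2) z → pvIdx (n + 2) (lget (unionA fuel par rank x y).1 z) := by
    intro z hz
    rw [hunEq]
    by_cases hz2 : z = rr
    · subst hz2
      rw [lget_lset_self hIrr.1 (by have := hIrr.1; have := hIrr.2; have := hok2.1; omega)]
      exact hIrk
    · rw [lget_lset_ne hIrr.1 hz.1 hz2]
      exact hok2.2.1 z hz
  have htot' : ∀ z, pvIdx (n + 2) z → ∃ r, ∃ k ≤ c + 1, pvReach (unionA fuel par rank x y).1 k z r := by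
    intro z hz
    obtain ⟨r, k, hkc, hk⟩ := hok2.2.2 z hz
    obtain ⟨j', hj', h'⟩ := reach_setroot hok2.1 hok2.2.1 hIrk hIrr hfixrk hfixrr k z r hz hk
    exact ⟨if r = rr then rk else r, j', by omega, hunEq ▸ h'⟩
  refine ⟨⟨hlen', hcl', htot'⟩, ?_, ?_⟩
  · by_cases hcc : lget comp x ≠ lget comp y
    · rw [if_pos hcc, List.length_map]; exact hclen
    · rw [if_neg hcc]; exact hclen
  · intro u v hu hv
    have huI := hu
    have hvI := hv
    have hu0 := hu.1; have hu1 := hu.2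
    have hv0 := hv.1; have hv1 := hv.2
    have hulen : u.toNat < comp.length := by rw [hclen]; omega
    have hvlen : v.toNat < comp.length := by rw [hclen]; omega
    obtain ⟨ru, ku, hkuc, hku⟩ := hok.2.2 u huI
    obtain ⟨rv, kv, hkvc, hkv⟩ := hok.2.2 v hvI
    have hrup : rootEx par u ru := ⟨ku, hku⟩
    have hrvp : rootEx par v rv := ⟨kv, hkv⟩
    have hpu := presM u ru huI hrup
    have hpv := presM v rv hvI hrvp
    have hL : pvSame (unionA fuel par rank x y).1 u v ↔
        (ru = rv ∨ (ru = rk ∧ rv = rr) ∨ (ru = rr ∧ rv = rk)) := by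
      rw [same_iff_roots hpu hpv, merge_eq]
    have e1 : ru = rv ↔ lget comp u = lget comp v :=
      (same_iff_roots hrup hrvp).symm.trans (hsame u v hu hv)
    have e2 : ru = rx ↔ lget comp u = lget comp x :=
      (same_iff_roots hrup hrx).symm.trans (hsame u x hu hx)
    have e3 : ru = ry ↔ lget comp u = lget comp y :=
      (same_iff_roots hrup hryp).symm.trans (hsame u y hu hy)
    have e4 : rv = rx ↔ lget comp v = lget comp x :=
      (same_iff_roots hrvp hrx).symm.trans (hsame v x hv hx)
    have e5 : rv = ry ↔ lget comp v = lget comp y :=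
      (same_iff_roots hrvp hryp).symm.trans (hsame v y hv hy)
    have exy : rx = ry ↔ lget comp x = lget comp y :=
      (same_iff_roots hrx hryp).symm.trans (hsame x y hx hy)
    rw [hL]
    by_cases hcc : lget comp x ≠ lget comp y
    · rw [if_pos hcc]
      have hmu : lget (comp.map (fun c => if c = lget comp y then lget comp x else c)) u =
          (fun c => if c = lget comp y then lget comp x else c) (lget comp u) :=
        lget_map _ hu0 hulen
      have hmv : lget (comp.map (fun c => if c = lget comp y then lget comp x else c)) v =
          (fun c => if c = lget comp y then lget comp x else c) (lget comp v) :=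
        lget_map _ hv0 hvlen
      rw [hmu, hmv]
      simp only []
      rw [merge_eq]
      rcases hkr with ⟨hk1, hk2⟩ | ⟨hk1, hk2⟩ <;> subst hk1 <;> subst hk2
      · rw [e1, e2, e3, e4, e5]
      · rw [e1, e2, e3, e4, e5]
        exact or_congr Iff.rfl or_comm
    · rw [if_neg hcc]
      rw [not_not] at hcc
      have hrxy : rx = ry := exy.mpr hcc
      have hrkrr : rk = rr := by
        rcases hkr with ⟨hk1, hk2⟩ | ⟨hk1, hk2⟩
        · exact hk1.trans (hrxy.trans hk2.symm)
        · exact hk1.trans (hrxy.symm.trans hk2.symm)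
      constructor
      · rintro (h | ⟨h1, h2⟩ | ⟨h1, h2⟩)
        · exact e1.mp h
        · exact e1.mp (h1.trans (hrkrr.trans h2.symm))
        · exact e1.mp (h1.trans (hrkrr.symm.trans h2.symm))
      · intro h
        exact Or.inl (e1.mpr h)

theorem edges_fold {n : Int} (fuel : Nat) (hf1 : 1 ≤ fuel) :
    ∀ (es : List (Int × Int)) (c : Nat) (par rank comp : List Int),
      c + es.length ≤ fuel → InvJ n c par comp →
      (∀ e ∈ es, (-(n + 2) ≤ e.1 ∧ e.1 < n + 2) ∧ (-(n + 2) ≤ e.2 ∧ e.2 < n + 2)) →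
      InvJ n (c + es.length)
        ((es.foldl (fun (s : List Int × List Int) xy => unionA fuel s.1 s.2 xy.1 xy.2) (par, rank)).1)
        (es.foldl (fun (comp : List Int) xy =>
            let cx := lget comp xy.1
            let cy := lget comp xy.2
            if cx ≠ cy then comp.map (fun c => if c = cy then cx else c) else comp) comp) := by
  intro es
  induction es with
  | nil =>
      intro c par rank comp _ hInv _
      simpa using hInv
  | cons e es ih =>
      intro c par rank comp hfuel hInv hmem
      have he := hmem e (List.mem_cons_self ..)
      obtain ⟨hokP, hclenP, hsameP⟩ := hInv
      have hn2 : 0 < n + 2 := by have := he.1.1; have := he.1.2; omega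
      have hxI := nlz_bounds he.1.1 he.1.2
      have hyI := nlz_bounds he.2.1 he.2.2
      have hA : unionA fuel par rank e.1 e.2 =
          unionA fuel par rank (pvNlz (n + 2) e.1) (pvNlz (n + 2) e.2) := by
        have h1 : findA fuel par e.1 = findA fuel par (pvNlz (n + 2) e.1) :=
          find_nlz hokP.1 hokP.2.1 he.1.1 hf1
        obtain ⟨_, hok1, _⟩ := find_keep hokP (show c ≤ fuel from by omega) hxI
        have h2 : findA fuel (findA fuel par (pvNlz (n + 2) e.1)).1 e.2 =
            findA fuel (findA fuel par (pvNlz (n + 2) e.1)).1 (pvNlz (n + 2) e.2) :=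
          find_nlz hok1.1 hok1.2.1 he.2.1 hf1
        simp only [unionA, h1, h2]
      have hcL : (comp.length : Int) = n + 2 := by rw [hclenP]; omega
      have g1 : lget comp e.1 = lget comp (pvNlz (n + 2) e.1) := lget_nlz hcL he.1.1
      have g2 : lget comp e.2 = lget comp (pvNlz (n + 2) e.2) := lget_nlz hcL he.2.1
      have hInv' : InvJ n c par comp := ⟨hokP, hclenP, hsameP⟩
      have hstep := step_edge (n := n) (fuel := fuel) (rank := rank)
        (by omega : c ≤ fuel) hInv' hxI hyI
      have hrec := ih (c + 1) (unionA fuel par rank (pvNlz (n + 2) e.1) (pvNlz (n + 2) e.2)).1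
        (unionA fuel par rank (pvNlz (n + 2) e.1) (pvNlz (n + 2) e.2)).2
        (if lget comp (pvNlz (n + 2) e.1) ≠ lget comp (pvNlz (n + 2) e.2) then
            comp.map (fun c => if c = lget comp (pvNlz (n + 2) e.2) then lget comp (pvNlz (n + 2) e.1) else c) else comp)
        (by simp at hfuel ⊢; omega) hstep
        (fun e' he' => hmem e' (List.mem_cons_of_mem _ he'))
      simp only [List.foldl_cons]
      have : (c + 1) + es.length = c + (es.length + 1) := by omega
      rw [this] at hrec
      simpa [hA, g1, g2] using hrec

theorem count_loop {n : Int} (fuel c : Nat) (comp p_list : List Int) (hc : c ≤ fuel) (hf1 : 1 ≤ fuel)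
    (hclen : comp.length = (n + 2).toNat)
    (hp : ∀ a : Int, 1 ≤ a → a ≤ n →
      -(n + 2) ≤ lget p_list (a - 1) ∧ lget p_list (a - 1) < n + 2) :
    ∀ (l : List Int) (par : List Int) (res : Int),
      (∀ a ∈ l, 1 ≤ a ∧ a ≤ n) →
      parOK n c par →
      (∀ u v, pvIdx (n + 2) u → pvIdx (n + 2) v → (pvSame par u v ↔ lget comp u = lget comp v)) →
      (l.foldl (fun (s : List Int × Int) a =>
          let fa := findA fuel s.1 a
          let fp := findA fuel fa.1 (lget p_list (a - 1))
          (fp.1, s.2 + if fa.2 = fp.2 then 1 else 0)) (par, res)).2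
        = l.foldl (fun acc a => acc + if lget comp a = lget comp (lget p_list (a - 1)) then 1 else 0) res := by
  intro l
  induction l with
  | nil => intro par res _ _ _; rfl
  | cons a l ih =>
      intro par res hl hok hsame
      have hla := hl a (List.mem_cons_self ..)
      have hn2 : 0 < n + 2 := by omega
      have haI : pvIdx (n + 2) a := ⟨by omega, by omega⟩
      have hpb := hp a hla.1 hla.2
      have hpaI := nlz_bounds hpb.1 hpb.2
      obtain ⟨hra, hok1, pres1⟩ := find_keep hok hc haI
      have hA2 : findA fuel (findA fuel par a).1 (lget p_list (a - 1)) =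
          findA fuel (findA fuel par a).1 (pvNlz (n + 2) (lget p_list (a - 1))) :=
        find_nlz hok1.1 hok1.2.1 hpb.1 hf1
      have hcL : (comp.length : Int) = n + 2 := by rw [hclen]; omega
      have g : lget comp (lget p_list (a - 1)) = lget comp (pvNlz (n + 2) (lget p_list (a - 1))) :=
        lget_nlz hcL hpb.1
      obtain ⟨hrp1, hok2, pres2⟩ := find_keep hok1 hc hpaI
      obtain ⟨rpa, kp, hkp, hkpr⟩ := hok.2.2 (pvNlz (n + 2) (lget p_list (a - 1))) hpaI
      have hrpa : rootEx par (pvNlz (n + 2) (lget p_list (a - 1))) rpa := ⟨kp, hkpr⟩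
      have hrp : (findA fuel (findA fuel par a).1 (pvNlz (n + 2) (lget p_list (a - 1)))).2 = rpa :=
        rootEx_unique hrp1 (pres1 _ rpa hpaI hrpa)
      have hcond : ((findA fuel par a).2 =
            (findA fuel (findA fuel par a).1 (pvNlz (n + 2) (lget p_list (a - 1)))).2)
          ↔ (lget comp a = lget comp (pvNlz (n + 2) (lget p_list (a - 1)))) := by
        rw [hrp]
        rw [← same_iff_roots hra hrpa]
        exact hsame a (pvNlz (n + 2) (lget p_list (a - 1))) haI hpaI
      have pres12 : ∀ z r, pvIdx (n + 2) z → rootEx par z r →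
          rootEx (findA fuel (findA fuel par a).1 (pvNlz (n + 2) (lget p_list (a - 1)))).1 z r :=
        fun z r hz hr => pres2 z r hz (pres1 z r hz hr)
      have hsame2 : ∀ u v, pvIdx (n + 2) u → pvIdx (n + 2) v →
          (pvSame (findA fuel (findA fuel par a).1 (pvNlz (n + 2) (lget p_list (a - 1)))).1 u v ↔
            lget comp u = lget comp v) := by
        intro u v hu hv
        rw [same_preserved pres12
          ((hok.2.2 u hu).imp (fun r hr => ⟨hr.choose, hr.choose_spec.2⟩))
          ((hok.2.2 v hv).imp (fun r hr => ⟨hr.choose, hr.choose_spec.2⟩))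
          hu hv]
        exact hsame u v hu hv
      simp only [List.foldl_cons]
      rw [hA2, g]
      rw [ih _ _ (fun a' ha' => hl a' (List.mem_cons_of_mem _ ha')) hok2 hsame2]
      rw [if_congr hcond rfl rfl]

-- ===== VERDICT (by name: the statement is the Claim_ definition above) =====
theorem solve_spec : Claim_equal_solve := by
  intro n m p_list xy_list _ hpre
  obtain ⟨hxyv, hpv⟩ := hpre
  show solve n m p_list xy_list = solve_alt n m p_list xy_list
  by_cases hn : n ≤ 0
  · have hrange : PySem.List.pyRange 1 (n + 1) 1 = [] := by
      rw [PySem.List.pyRange_one]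
      have h0 : ((n + 1) - 1).toNat = 0 := by omega
      rw [h0]
      rfl
    simp [solve, solve_alt, hrange]
  · have hn1 : 1 ≤ n := by omega
    obtain ⟨hplen, hpval⟩ := hpv (by omega)
    have hp : ∀ a : Int, 1 ≤ a → a ≤ n →
        -(n + 2) ≤ lget p_list (a - 1) ∧ lget p_list (a - 1) < n + 2 := by
      intro a h1 h2
      have hidx : (a - 1).toNat < p_list.length := by omega
      have hval : lget p_list (a - 1) = p_list[(a - 1).toNat] := by
        rw [lget, PySem.List.pyGetD_eq_getElem _ _ (by omega) (by omega)]
      have hmem : p_list[(a - 1).toNat] ∈ p_list.take n.toNat := by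
        have hg : (p_list.take n.toNat)[(a - 1).toNat]'(by simp; omega) = p_list[(a - 1).toNat] :=
          List.getElem_take
        exact hg ▸ List.getElem_mem _
      have hrange := hpval _ hmem
      obtain ⟨hr1, hr2⟩ := hrange
      rw [hval]
      omega
    have hInv0 : InvJ n 0 (PySem.List.pyRange 0 (n + 2) 1) (PySem.List.pyRange 0 (n + 2) 1) := by
      refine ⟨⟨?_, ?_, ?_⟩, ?_, ?_⟩
      · rw [PySem.List.length_pyRange_one]; omega
      · intro z hz
        rw [lget_pyRange0 hz.1 hz.2]
        exact hz
      · intro z hz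
        exact ⟨z, 0, by omega, rfl, lget_pyRange0 hz.1 hz.2⟩
      · rw [PySem.List.length_pyRange_one]; omega
      · intro u v hu hv
        have ru : rootEx (PySem.List.pyRange 0 (n + 2) 1) u u :=
          ⟨0, rfl, lget_pyRange0 hu.1 hu.2⟩
        have rv : rootEx (PySem.List.pyRange 0 (n + 2) 1) v v :=
          ⟨0, rfl, lget_pyRange0 hv.1 hv.2⟩
        rw [same_iff_roots ru rv, lget_pyRange0 hu.1 hu.2, lget_pyRange0 hv.1 hv.2]
    have hEdges := edges_fold (n := n) ((n + 2).toNat + xy_list.length) (by omega) xy_list 0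
      (PySem.List.pyRange 0 (n + 2) 1) (List.replicate (n + 2).toNat (0 : Int))
      (PySem.List.pyRange 0 (n + 2) 1) (by omega) hInv0
      (fun e he => by
        obtain ⟨⟨ha1, ha2⟩, hb1, hb2⟩ := hxyv e he
        constructor <;> constructor <;> omega)
    rw [show 0 + xy_list.length = xy_list.length from by omega] at hEdges
    obtain ⟨hokF, hclenF, hsameF⟩ := hEdges
    have hcount := count_loop (n := n) ((n + 2).toNat + xy_list.length) xy_list.length _ p_list
      (by omega) (by omega) hclenF hp (PySem.List.pyRange 1 (n + 1) 1) _ 0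
      (fun a hal => by rw [PySem.List.mem_pyRange_one] at hal; exact ⟨hal.1, by omega⟩)
      hokF hsameF
    simpa [solve, solve_alt] using hcount
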